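-- pv_equiv track=rewrite | github.com/Keysanne/adventcode | jour15.py | hash_algorithm
-- ===== SOURCE A (Python) =====
-- def	hash_algorithm(value):
-- 	rst = 0
-- 	for char in value:
-- 		if char == '=' or char == '-':
-- 			break
-- 		rst += ord(char)
-- 		rst *=  17
-- 		rst %= 256
-- 	return rst
-- ===== SOURCE B (Python) =====
-- def hash_algorithm(value):
--     # closed form: the hash is a polynomial in 17 over the prefix before '='/'-',
--     # evaluated as a weighted sum with modular powers instead of a running accumulator
--     m = next((j for j, c in enumerate(value) if c in '=-'), len(value))
--     prefix = value[:m]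
--     return sum(ord(c) * pow(17, m - j, 256) for j, c in enumerate(prefix)) % 256
-- ===== Notes on version B (the rewrite author's own statement) =====
-- stated objective: alternative
-- what changed: B replaces A's running-accumulator loop by a closed form: it finds the first '='/'-' boundary, then evaluates the hash as a weighted sum sum(ord(c)*pow(17, m-j, 256)) % 256 over the prefix, computing each character's power-of-17 weight independently instead of threading an accumulator.
import Mathlib
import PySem

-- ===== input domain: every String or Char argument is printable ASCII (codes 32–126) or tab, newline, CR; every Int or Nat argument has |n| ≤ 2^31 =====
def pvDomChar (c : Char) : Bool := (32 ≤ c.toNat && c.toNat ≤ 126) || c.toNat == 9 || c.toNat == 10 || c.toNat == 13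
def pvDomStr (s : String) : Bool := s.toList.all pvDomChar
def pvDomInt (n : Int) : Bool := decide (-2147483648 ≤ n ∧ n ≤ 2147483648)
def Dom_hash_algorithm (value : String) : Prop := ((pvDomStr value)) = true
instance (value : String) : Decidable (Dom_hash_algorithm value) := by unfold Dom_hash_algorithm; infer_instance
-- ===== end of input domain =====

-- B replaces A's running-accumulator hash loop by a closed form: find the '='/'-' boundary,
-- then evaluate the hash as a weighted sum of ord(c) * 17^(m-j) mod 256 over the prefix.

-- ===== PORT A =====
-- A's for-loop with break, as structural recursion over the characters with accumulator rst
def hashLoopA : List Char → Int → Int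
  | [], rst => rst
  | c :: cs, rst =>
    if c = '=' ∨ c = '-' then rst
    else hashLoopA cs (PySem.Int.mod ((rst + (c.toNat : Int)) * 17) 256)

def hash_algorithm (value : String) : Int := hashLoopA value.toList 0

-- ===== PORT B =====
-- port of next((j for j, c in enumerate(value) if c in '=-'), len(value)): index of the first delimiter, else the length
def firstDelim : List Char → Nat
  | [] => 0
  | c :: cs => if c = '=' ∨ c = '-' then 0 else firstDelim cs + 1

def hash_algorithm_alt (value : String) : Int :=
  let cs := value.toList
  let m := firstDelim cs
  let pref := cs.take m   -- value[:m], m a nonnegative in-range bound so the slice is List.take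
  PySem.Int.mod
    (((PySem.List.enumerate pref).map
        (fun p => (p.2.toNat : Int) * PySem.Int.mod ((17 : Int) ^ ((m : Int) - p.1).toNat) 256)).sum)
    256

-- ===== PRECONDITION & SPEC =====
def Spec_hash_algorithm (value : String) (out : Int) : Prop := out = hash_algorithm_alt value
instance (value : String) (out : Int) : Decidable (Spec_hash_algorithm value out) := by unfold Spec_hash_algorithm; infer_instance

-- ===== CLAIM (what is proved, stated in full; the proofs are below) =====
def Claim_equal_hash_algorithm : Prop := ∀ (value : String), Dom_hash_algorithm value → Spec_hash_algorithm value (hash_algorithm value)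

-- ===== LEMMAS AND PROOFS =====

theorem pymod256 (x : Int) : PySem.Int.mod x 256 = x % 256 :=
  PySem.Int.mod_eq_emod_of_pos (by norm_num)

-- the exact weighted sum (no mods): W [c0, …, c_{k-1}] = Σ ord(ci) * 17^(k-i)
def Wsum : List Char → Int
  | [] => 0
  | c :: t => (c.toNat : Int) * 17 ^ (t.length + 1) + Wsum t

theorem firstDelim_le (cs : List Char) : firstDelim cs ≤ cs.length := by
  induction cs with
  | nil => simp [firstDelim]
  | cons c t ih =>
    by_cases h : c = '=' ∨ c = '-'
    · simp [firstDelim, h]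
    · simp [firstDelim, h]; omega

theorem take_firstDelim (cs : List Char) :
    cs.take (firstDelim cs) = cs.takeWhile (fun c => !(c = '=' || c = '-')) := by
  induction cs with
  | nil => rfl
  | cons c t ih =>
    by_cases h : c = '=' ∨ c = '-'
    · rcases h with h | h <;> simp [firstDelim, h, List.takeWhile]
    · push Not at h
      simp [firstDelim, h.1, h.2, List.takeWhile, ih]

theorem hashLoopA_eq_foldl_takeWhile (cs : List Char) (rst : Int) :
    hashLoopA cs rst =
      (cs.takeWhile (fun c => !(c = '=' || c = '-'))).foldl
        (fun acc c => PySem.Int.mod ((acc + (c.toNat : Int)) * 17) 256) rst := by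
  induction cs generalizing rst with
  | nil => rfl
  | cons c cs ih =>
    by_cases h : c = '=' ∨ c = '-'
    · simp [hashLoopA, h, List.takeWhile]
      rcases h with h | h <;> simp [h]
    · simp only [hashLoopA, h, if_false]
      push Not at h
      simp [List.takeWhile, h.1, h.2, ih]

theorem foldl_hash_eq_Wsum (l : List Char) (r : Int) :
    l.foldl (fun acc c => ((acc + (c.toNat : Int)) * 17) % 256) (r % 256)
      = (r * 17 ^ l.length + Wsum l) % 256 := by
  induction l generalizing r with
  | nil => simp [Wsum]
  | cons c t ih =>
    simp only [List.foldl_cons]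
    rw [ih ((r % 256 + (c.toNat : Int)) * 17)]
    have hm : (r % 256 : Int) ≡ r [ZMOD 256] := Int.emod_emod_of_dvd r dvd_rfl
    have h2 : ((r % 256 + (c.toNat : Int)) * 17 * 17 ^ t.length + Wsum t) % 256
        = ((r + (c.toNat : Int)) * 17 * 17 ^ t.length + Wsum t) % 256 :=
      (((hm.add_right _).mul_right _).mul_right _).add_right _
    rw [h2]
    congr 1
    simp [Wsum]
    ring

theorem enum_sum_eq_Wsum (l : List Char) (s : Int) (m : Nat) (hs : s + l.length = (m : Int)) :
    (((PySem.List.enumerate l s).map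
        (fun p => (p.2.toNat : Int) * ((17 : Int) ^ (((m : Int) - p.1).toNat) % 256))).sum) % 256
      = Wsum l % 256 := by
  induction l generalizing s with
  | nil => simp [Wsum]
  | cons c t ih =>
    rw [PySem.List.enumerate_cons]
    simp only [List.map_cons, List.sum_cons]
    have hexp : (((m : Int) - s).toNat) = t.length + 1 := by
      simp at hs; omega
    rw [hexp]
    have hpow : ((17 : Int) ^ (t.length + 1) % 256) ≡ (17 : Int) ^ (t.length + 1) [ZMOD 256] :=
      Int.emod_emod_of_dvd _ dvd_rfl
    have htail : (((PySem.List.enumerate t (s + 1)).map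
        (fun p => (p.2.toNat : Int) * ((17 : Int) ^ (((m : Int) - p.1).toNat) % 256))).sum)
        ≡ Wsum t [ZMOD 256] := ih (s + 1) (by simp at hs ⊢; omega)
    have h := (hpow.mul_left ((c.toNat : Int))).add htail
    simpa [Wsum] using h

-- ===== VERDICT (by name: the statement is the Claim_ definition above) =====
theorem hash_algorithm_spec : Claim_equal_hash_algorithm := by
  intro value _
  unfold Spec_hash_algorithm hash_algorithm hash_algorithm_alt
  dsimp only
  rw [hashLoopA_eq_foldl_takeWhile]
  simp only [pymod256]
  have hlen : (value.toList.take (firstDelim value.toList)).length = firstDelim value.toList := by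
    have hle := firstDelim_le value.toList
    simp [List.length_take]
    simpa using hle
  rw [enum_sum_eq_Wsum _ 0 _ (by simp [hlen]), take_firstDelim]
  have h := foldl_hash_eq_Wsum (value.toList.takeWhile (fun c => !(c = '=' || c = '-'))) 0
  simpa using h
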